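-- pv_equiv track=rewrite | github.com/nhf216/single-cut-and-join | MPSrec.py | Sbar
-- ===== SOURCE A (Python) =====
-- import math
--
-- def Sbar(m, w):
--     ret = 0
--     for k in range(w):
--         total = 0
--         for c in range(m):
--             total += math.comb(m + w - 1 - k, c)
--         ret += total * 2**(k + 2)
--     return ret
-- ===== SOURCE B (Python) =====
-- def Sbar(m, w):
--     # One pass with an incremental recurrence: S(n) = sum_{c<m} C(n,c) satisfies
--     # S(n+1) = 2*S(n) - C(n, m-1), and C(n, m-1) is updated multiplicatively.
--     if m <= 0 or w <= 0:
--         return 0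
--     ret = 0
--     S = 2 ** m - 1          # S(m) = sum_{c<m} C(m,c) = 2^m - C(m,m)
--     c = m                   # C(m, m-1)
--     weight = 2 ** (w + 1)   # weight for row n=m is 2^(k+2) with k = w-1
--     for i in range(w):
--         n = m + i
--         ret += S * weight
--         weight //= 2
--         S = 2 * S - c
--         c = c * (n + 1) // (n + 2 - m)
--     return ret
-- ===== Notes on version B (the rewrite author's own statement) =====
-- stated objective: faster
-- what changed: Replaces the nested loops of math.comb calls by a single pass that maintains the partial row sum S(n)=sum_{c<m} C(n,c) via the recurrence S(n+1)=2*S(n)-C(n,m-1) and updates C(n,m-1) multiplicatively.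
import Mathlib
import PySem

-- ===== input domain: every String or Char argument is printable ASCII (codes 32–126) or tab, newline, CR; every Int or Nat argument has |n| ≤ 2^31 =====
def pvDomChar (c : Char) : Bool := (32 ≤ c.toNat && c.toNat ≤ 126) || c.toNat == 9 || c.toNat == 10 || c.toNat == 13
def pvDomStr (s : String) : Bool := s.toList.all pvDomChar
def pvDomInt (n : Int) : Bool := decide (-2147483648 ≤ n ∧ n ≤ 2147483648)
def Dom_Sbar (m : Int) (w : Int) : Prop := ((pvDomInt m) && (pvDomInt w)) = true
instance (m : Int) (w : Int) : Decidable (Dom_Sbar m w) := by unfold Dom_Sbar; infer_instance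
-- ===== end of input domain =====

-- B replaces A's nested loops of math.comb calls by a single pass maintaining the
-- partial row sum S(n) = Σ_{c<m} C(n,c) via S(n+1) = 2·S(n) − C(n,m−1) (faster).

-- ===== PORT A =====
-- math.comb n k; exact for 0 ≤ n, 0 ≤ k, which holds at every call A makes
-- (inner loop runs only when m ≥ 1, and then n = m+w-1-k ≥ m ≥ 1 and c ≥ 0).
def pyComb (n k : Int) : Int := (Nat.choose n.toNat k.toNat : Int)

def Sbar (m : Int) (w : Int) : Int :=
  (PySem.List.pyRange 0 w 1).foldl (fun ret k =>
    let total := (PySem.List.pyRange 0 m 1).foldl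
      (fun total c => total + pyComb (m + w - 1 - k) c) 0
    ret + total * 2 ^ (k + 2).toNat) 0

-- ===== PORT B =====
-- state = (ret, S, c, weight), exactly Source B's loop variables
def Sbar_alt (m : Int) (w : Int) : Int :=
  if m ≤ 0 ∨ w ≤ 0 then 0
  else
    let st := (PySem.List.pyRange 0 w 1).foldl
      (fun (st : Int × Int × Int × Int) i =>
        let n := m + i
        let ret := st.1 + st.2.1 * st.2.2.2
        let weight := PySem.Int.floordiv st.2.2.2 2
        let S := 2 * st.2.1 - st.2.2.1
        let c := PySem.Int.floordiv (st.2.2.1 * (n + 1)) (n + 2 - m)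
        (ret, S, c, weight))
      (0, 2 ^ m.toNat - 1, m, 2 ^ (w + 1).toNat)
    st.1

-- ===== PRECONDITION & SPEC =====
def Spec_Sbar (m : Int) (w : Int) (out : Int) : Prop := out = Sbar_alt m w
instance (m : Int) (w : Int) (out : Int) : Decidable (Spec_Sbar m w out) := by unfold Spec_Sbar; infer_instance

-- ===== CLAIM (what is proved, stated in full; the proofs are below) =====
def Claim_equal_Sbar : Prop := ∀ (m : Int) (w : Int), Dom_Sbar m w → Spec_Sbar m w (Sbar m w)

-- ===== LEMMAS AND PROOFS =====

-- T M n = Σ_{c<M} C(n,c), the partial binomial row sum, in ℤ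
def pvT (M n : ℕ) : Int := ∑ c ∈ Finset.range M, ((n.choose c : ℕ) : Int)

theorem pvSum_list (n : ℕ) (f : ℕ → Int) :
    ((List.range n).map f).sum = ∑ i ∈ Finset.range n, f i := rfl

theorem pvT_self (M : ℕ) (hM : 1 ≤ M) : pvT M M = 2 ^ M - 1 := by
  obtain ⟨M', rfl⟩ : ∃ M', M = M' + 1 := ⟨M - 1, by omega⟩
  have h := Nat.sum_range_choose (M' + 1)
  have h' : (∑ c ∈ Finset.range (M' + 1 + 1), (((M' + 1).choose c : ℕ) : Int)) = 2 ^ (M' + 1) := by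
    exact_mod_cast congrArg (Nat.cast : ℕ → Int) h
  rw [Finset.sum_range_succ] at h'
  simp only [pvT]
  simp [Nat.choose_self] at h'
  omega

theorem pvT_succ (M n : ℕ) (hM : 1 ≤ M) :
    pvT M (n + 1) = 2 * pvT M n - ((n.choose (M - 1) : ℕ) : Int) := by
  obtain ⟨M', rfl⟩ : ∃ M', M = M' + 1 := ⟨M - 1, by omega⟩
  simp only [pvT, Nat.add_sub_cancel]
  rw [Finset.sum_range_succ' (fun c => (((n + 1).choose c : ℕ) : Int)) M']
  have hsplit : ∀ c, (((n + 1).choose (c + 1) : ℕ) : Int)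
      = ((n.choose c : ℕ) : Int) + ((n.choose (c + 1) : ℕ) : Int) := by
    intro c; exact_mod_cast congrArg (Nat.cast : ℕ → Int) (Nat.choose_succ_succ n c)
  rw [Finset.sum_congr rfl (fun c _ => hsplit c), Finset.sum_add_distrib]
  have hs : (∑ c ∈ Finset.range (M' + 1), ((n.choose c : ℕ) : Int))
      = (∑ c ∈ Finset.range M', ((n.choose c : ℕ) : Int)) + ((n.choose M' : ℕ) : Int) :=
    Finset.sum_range_succ (fun c => ((n.choose c : ℕ) : Int)) M'
  have h0 : (∑ c ∈ Finset.range (M' + 1), ((n.choose c : ℕ) : Int))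
      = ∑ c ∈ Finset.range M', ((n.choose (c + 1) : ℕ) : Int) + ((n.choose 0 : ℕ) : Int) :=
    Finset.sum_range_succ' (fun c => ((n.choose c : ℕ) : Int)) M'
  simp only [Nat.choose_zero_right, Nat.cast_one] at h0 hs ⊢
  omega

theorem pvChoose_pred (M : ℕ) (hM : 1 ≤ M) : M.choose (M - 1) = M := by
  obtain ⟨M', rfl⟩ : ∃ M', M = M' + 1 := ⟨M - 1, by omega⟩
  simp [Nat.choose_succ_self_right]

-- the step function of B's loop, with m fixed
def pvStep (m : Int) (st : Int × Int × Int × Int) (i : Int) : Int × Int × Int × Int :=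
  let n := m + i
  let ret := st.1 + st.2.1 * st.2.2.2
  let weight := PySem.Int.floordiv st.2.2.2 2
  let S := 2 * st.2.1 - st.2.2.1
  let c := PySem.Int.floordiv (st.2.2.1 * (n + 1)) (n + 2 - m)
  (ret, S, c, weight)

theorem pvBloop (m : Int) (M W : ℕ) (hMm : ((M : ℕ) : Int) = m) (hM : 1 ≤ M)
    (i : ℕ) (hi : i ≤ W) :
    (((List.range i).map (fun k => ((k : ℕ) : Int))).foldl (pvStep m)
      (0, 2 ^ M - 1, m, 2 ^ (W + 1)))
    = (∑ j ∈ Finset.range i, pvT M (M + j) * 2 ^ (W + 1 - j),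
       pvT M (M + i), (((M + i).choose (M - 1) : ℕ) : Int), 2 ^ (W + 1 - i)) := by
  subst hMm
  induction i with
  | zero =>
      simp [pvT_self M hM, pvChoose_pred M hM]
  | succ i ih =>
      have hi' : i ≤ W := by omega
      rw [List.range_succ, List.map_append, List.foldl_append, ih hi']
      simp only [List.map_cons, List.map_nil, List.foldl_cons, List.foldl_nil, pvStep]
      have e2 : W + 1 - i = (W - i) + 1 := by omega
      simp only [Prod.mk.injEq]
      refine ⟨?_, ?_, ?_, ?_⟩
      · -- ret
        rw [Finset.sum_range_succ]
      · -- S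
        have h := pvT_succ M (M + i) hM
        have e : M + i + 1 = M + (i + 1) := by omega
        rw [e] at h
        simp only [h]
      · -- c
        have hkey : (M + i).choose (M - 1) * (M + i + 1) = (M + i + 1).choose (M - 1) * (i + 2) := by
          have h := Nat.choose_mul_succ_eq (M + i) (M - 1)
          have e : M + i + 1 - (M - 1) = i + 2 := by omega
          rw [e] at h
          exact h
        have hpos : (0 : Int) < (M : Int) + (i : ℕ) + 2 - (M : Int) := by omega
        rw [PySem.Int.floordiv_eq_ediv_of_pos hpos]
        have hnum : (((M + i).choose (M - 1) : ℕ) : Int) * ((M : Int) + (i : ℕ) + 1)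
            = (((M + i + 1).choose (M - 1) : ℕ) : Int) * (((i : ℕ) : Int) + 2) := by
          have := congrArg (Nat.cast : ℕ → Int) hkey
          push_cast at this ⊢
          linarith [this]
        have hden : ((M : Int) + (i : ℕ) + 2 - (M : Int)) = (((i : ℕ) : Int) + 2) := by ring
        rw [hnum, hden, Int.mul_ediv_cancel _ (by positivity)]
        have e : M + i + 1 = M + (i + 1) := by omega
        rw [e]
      · -- weight
        have e3 : W + 1 - (i + 1) = W - i := by omega
        rw [e2, e3, pow_succ, PySem.Int.floordiv_eq_ediv_of_pos (by norm_num : (0:Int) < 2),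
          Int.mul_ediv_cancel _ (by norm_num)]

theorem pvFoldl_trivial (l : List Int) (r : Int) :
    l.foldl (fun ret k => ret + (0 : Int) * 2 ^ (k + 2).toNat) r = r := by
  induction l generalizing r with
  | nil => rfl
  | cons x xs ih =>
      rw [List.foldl_cons, zero_mul, add_zero]
      exact ih r

theorem pvB_eq (m w : Int) (hm : 1 ≤ m) (hw : 1 ≤ w) :
    Sbar_alt m w
    = ∑ j ∈ Finset.range w.toNat, pvT m.toNat (m.toNat + j) * 2 ^ (w.toNat + 1 - j) := by
  unfold Sbar_alt
  rw [if_neg (by omega)]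
  show ((PySem.List.pyRange 0 w 1).foldl (pvStep m)
      (0, 2 ^ m.toNat - 1, m, 2 ^ (w + 1).toNat)).1 = _
  rw [PySem.List.pyRange_one]
  simp only [Int.sub_zero, zero_add]
  have hwt : (w + 1).toNat = w.toNat + 1 := by omega
  rw [hwt, pvBloop m m.toNat w.toNat (by omega) (by omega) w.toNat le_rfl]

theorem pvA_eq_sum (m w : Int) (hm : 1 ≤ m) (hw : 1 ≤ w) :
    Sbar m w = ∑ k ∈ Finset.range w.toNat,
      pvT m.toNat (m.toNat + w.toNat - 1 - k) * 2 ^ (k + 2) := by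
  unfold Sbar
  rw [PySem.List.pyRange_one, PySem.List.pyRange_one]
  simp only [Int.sub_zero, zero_add]
  rw [List.foldl_map, PySem.List.foldl_add, zero_add, pvSum_list]
  refine Finset.sum_congr rfl ?_
  intro k hk
  have hk' : k < w.toNat := Finset.mem_range.mp hk
  rw [List.foldl_map, PySem.List.foldl_add, zero_add, pvSum_list]
  have hexp : (((k : ℕ) : Int) + 2).toNat = k + 2 := by omega
  rw [hexp]
  congr 1
  unfold pvT
  refine Finset.sum_congr rfl ?_
  intro c _
  unfold pyComb
  congr 2
  omega

theorem pvSum_reflect (M W : ℕ) :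
    (∑ k ∈ Finset.range W, pvT M (M + W - 1 - k) * 2 ^ (k + 2))
    = ∑ j ∈ Finset.range W, pvT M (M + j) * 2 ^ (W + 1 - j) := by
  rw [← Finset.sum_range_reflect (fun j => pvT M (M + j) * 2 ^ (W + 1 - j)) W]
  refine Finset.sum_congr rfl ?_
  intro k hk
  have hk' : k < W := Finset.mem_range.mp hk
  have h1 : M + (W - 1 - k) = M + W - 1 - k := by omega
  have h2 : W + 1 - (W - 1 - k) = k + 2 := by omega
  rw [h1, h2]

-- ===== VERDICT (by name: the statement is the Claim_ definition above) =====
theorem Sbar_spec : Claim_equal_Sbar := by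
  intro m w _
  unfold Spec_Sbar
  by_cases hdeg : m ≤ 0 ∨ w ≤ 0
  · rw [Sbar_alt, if_pos hdeg]
    by_cases hw : w ≤ 0
    · unfold Sbar
      rw [PySem.List.pyRange_one_eq_nil hw]
      rfl
    · have hm : m ≤ 0 := by tauto
      unfold Sbar
      have hin : PySem.List.pyRange 0 m 1 = [] := PySem.List.pyRange_one_eq_nil (by omega)
      simp only [hin, List.foldl_nil]
      exact pvFoldl_trivial _ 0
  · simp only [not_or, not_le] at hdeg
    obtain ⟨hm, hw⟩ := hdeg
    rw [pvA_eq_sum m w (by omega) (by omega), pvB_eq m w (by omega) (by omega),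
      pvSum_reflect m.toNat w.toNat]
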